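-- pv_equiv track=rewrite | github.com/juliefrwang/splash-structure | src/process_targets.py | find_stem_ind
-- ===== SOURCE A (Python) =====
-- def rc(seq):
--     """
--     Take in sequence and return the reverse complement of the given sequence.
--     """
--     complement = {'A': 'T', 'C': 'G', 'G': 'C', 'T': 'A'}
--     return ''.join(complement.get(base, base) for base in reversed(seq))
--
-- def find_stem_ind(target, stem_L=5):
--     """
--     This fucntion find a hairpin structure in `target` sequence and returns stem indices.
--
--     Input:
--     A target sequence and the minimum stem length (default value is 5).
--
--     Output:
--     A list of 5 quantities, [stem_start_idx, stem_end_idx, rc_start_idx, rc_end_idx, stemL] if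
--     a hairpin is found. Else, return [0,0,0,0,0].
--     1. stem_start_idx: the start index of the stem in the target sequence.
--     2. stem_end_idx: the end index of the stem in the target sequence.
--     3. rc_start_idx: the start index of the reverse complement of the stem in the target sequence.
--     4. rc_end_idx: the end index of the reverse complement of the stem in the target sequence.
--     5. stemL: the length of the stem.
--
--     Note:
--     Index starts from 0. The base at stem_start_idx and stem_end_idx are both included in the stem.
--     Same for rc_start_idx and rc_end_idx.
--     """
--     max_size = len(target) // 2
--     for i in reversed(range(stem_L,max_size+1)):
--         for j in range(len(target)-2*i+1):
--             loc = target[j+i:].find(rc(target[j:j+i]))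
--             if loc > -1:
--                 stem_start_idx = j
--                 stem_end_idx = i + j-1
--                 rc_start_idx = loc + i + j
--                 rc_end_idx = loc + i + j + i-1
--                 return stem_start_idx, stem_end_idx, rc_start_idx, rc_end_idx, stem_end_idx-stem_start_idx+1
--     return [0,0,0,0,0]
-- ===== SOURCE B (Python) =====
-- def find_stem_ind(target, stem_L=5):
--     """DP re-implementation: precompute complementary-run lengths for every
--     (stem-end, rc-start) pair once, then scan lengths descending with O(1) tests."""
--     complement = {'A': 'T', 'C': 'G', 'G': 'C', 'T': 'A'}
--     n = len(target)
--     # run[e][p] = number of consecutive complementary pairs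
--     # (target[e],target[p]), (target[e-1],target[p+1]), ... ; run[e][n] = 0.
--     run = []
--     prev = [0] * (n + 1)
--     for e in range(n):
--         ce = complement.get(target[e], target[e])
--         cur = [(1 + prev[p + 1]) if target[p] == ce else 0 for p in range(n)]
--         cur.append(0)
--         run.append(cur)
--         prev = cur
--     rowmax = [max(row) for row in run]
--     max_size = n // 2
--     for i in reversed(range(max(stem_L, 0), max_size + 1)):
--         for j in range(n - 2 * i + 1):
--             e = j + i - 1
--             if 0 <= e and rowmax[e] < i:
--                 continue
--             for p in range(j + i, n + 1):
--                 if (run[e][p] if 0 <= e else 0) >= i: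
--                     return j, e, p, p + i - 1, i
--     return [0, 0, 0, 0, 0]
-- ===== Notes on version B (the rewrite author's own statement) =====
-- stated objective: alternative
-- what changed: Replaces the per-(length,start) reverse-complement string construction and substring .find with a complementary-run DP table (plus per-row maxima used to skip hopeless rows) computed once, after which each candidate (stem end, rc start) is tested in O(1).
import Mathlib
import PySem

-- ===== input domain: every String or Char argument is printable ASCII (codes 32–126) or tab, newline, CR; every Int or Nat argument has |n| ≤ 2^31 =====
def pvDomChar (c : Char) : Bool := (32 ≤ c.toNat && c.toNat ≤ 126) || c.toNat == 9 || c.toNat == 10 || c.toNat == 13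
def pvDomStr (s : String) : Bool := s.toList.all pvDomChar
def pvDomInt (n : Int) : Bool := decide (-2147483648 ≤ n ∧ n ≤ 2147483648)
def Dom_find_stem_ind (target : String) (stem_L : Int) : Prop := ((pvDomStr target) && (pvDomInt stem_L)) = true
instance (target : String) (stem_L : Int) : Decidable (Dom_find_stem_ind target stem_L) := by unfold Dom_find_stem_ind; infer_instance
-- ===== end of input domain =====

-- B replaces A's per-candidate reverse-complement construction + substring .find with a
-- complementary-run DP table built once, then O(1) tests per candidate (alternative algorithm,
-- not measured faster); return value is proved identical on every input.

-- ===== PORT A =====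

-- complement dict shared by both Pythons
def pvComplement : PySem.Dict Char Char :=
  PySem.Dict.ofList [('A','T'),('C','G'),('G','C'),('T','A')]

-- complement.get(base, base)
def pvComp (c : Char) : Char := PySem.Dict.getD pvComplement c c

-- A's rc: ''.join(complement.get(base, base) for base in reversed(seq))
def pvRc (seq : List Char) : List Char := seq.reverse.map pvComp

-- A's inner 'for j in range(len(target)-2*i+1)' loop with its early return
def pvAJ (t : List Char) (i : Int) : List Int → Option (List Int)
  | [] => none
  | j :: js =>
    let loc := PySem.Chars.find (PySem.List.slice t (some (j+i)) none)
                 (pvRc (PySem.List.slice t (some j) (some (j+i))))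
    if loc > -1 then
      some [j, i + j - 1, loc + i + j, loc + i + j + i - 1, (i + j - 1) - j + 1]
    else pvAJ t i js

-- A's outer 'for i in reversed(range(stem_L, max_size+1))' loop
def pvAI (t : List Char) : List Int → List Int
  | [] => [0, 0, 0, 0, 0]
  | i :: is =>
    match pvAJ t i (PySem.List.pyRange 0 ((t.length : Int) - 2*i + 1)) with
    | some r => r
    | none => pvAI t is

def find_stem_ind (target : String) (stem_L : Int) : List Int :=
  let t := target.toList
  let max_size := PySem.Int.floordiv (t.length : Int) 2
  pvAI t ((PySem.List.pyRange stem_L (max_size + 1)).reverse)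

-- ===== PORT B =====

-- one DP row: [(1 + prev[p+1]) if target[p] == ce else 0 for p in range(n)] + [0]
def pvRow (t : List Char) (prev : List Int) (e : Int) : List Int :=
  let ce := pvComp (PySem.List.pyGetD t e ' ')
  ((PySem.List.pyRange 0 (t.length : Int)).map
    (fun p => if PySem.List.pyGetD t p ' ' == ce then 1 + PySem.List.pyGetD prev (p+1) 0 else 0)) ++ [0]

-- the table-building loop: run = []; prev = [0]*(n+1); for e in range(n): ...
def pvRun (t : List Char) : List (List Int) :=
  ((PySem.List.pyRange 0 (t.length : Int)).foldl
    (fun st e => let cur := pvRow t st.2 e; (st.1 ++ [cur], cur))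
    (([] : List (List Int)), List.replicate (t.length + 1) (0 : Int))).1

-- rowmax = [max(row) for row in run]
def pvRowmax (run : List (List Int)) : List Int :=
  run.map (fun row => (PySem.List.max? row (fun y => y)).getD 0)

-- B's inner 'for p in range(j+i, n+1)' scan
def pvBP (run : List (List Int)) (i j e : Int) : List Int → Option (List Int)
  | [] => none
  | p :: ps =>
    let v := if 0 ≤ e then PySem.List.pyGetD (PySem.List.pyGetD run e []) p 0 else 0
    if v ≥ i then some [j, e, p, p + i - 1, i] else pvBP run i j e ps

-- B's 'for j in range(n - 2*i + 1)' loop with the row-max skip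
def pvBJ (t : List Char) (run : List (List Int)) (rowmax : List Int) (i : Int) :
    List Int → Option (List Int)
  | [] => none
  | j :: js =>
    if 0 ≤ j + i - 1 ∧ PySem.List.pyGetD rowmax (j + i - 1) 0 < i then
      pvBJ t run rowmax i js
    else
      match pvBP run i j (j + i - 1) (PySem.List.pyRange (j+i) ((t.length : Int) + 1)) with
      | some r => some r
      | none => pvBJ t run rowmax i js

-- B's 'for i in reversed(range(max(stem_L, 0), max_size + 1))' loop
def pvBI (t : List Char) (run : List (List Int)) (rowmax : List Int) : List Int → List Int
  | [] => [0, 0, 0, 0, 0]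
  | i :: is =>
    match pvBJ t run rowmax i (PySem.List.pyRange 0 ((t.length : Int) - 2*i + 1)) with
    | some r => r
    | none => pvBI t run rowmax is

def find_stem_ind_alt (target : String) (stem_L : Int) : List Int :=
  let t := target.toList
  let run := pvRun t
  let rowmax := pvRowmax run
  let max_size := PySem.Int.floordiv (t.length : Int) 2
  pvBI t run rowmax ((PySem.List.pyRange (max stem_L 0) (max_size + 1)).reverse)

-- ===== PRECONDITION & SPEC =====
def Spec_find_stem_ind (target : String) (stem_L : Int) (out : List Int) : Prop := out = find_stem_ind_alt target stem_L
instance (target : String) (stem_L : Int) (out : List Int) : Decidable (Spec_find_stem_ind target stem_L out) := by unfold Spec_find_stem_ind; infer_instance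

-- ===== CLAIM (what is proved, stated in full; the proofs are below) =====
def Claim_equal_find_stem_ind : Prop := ∀ (target : String) (stem_L : Int), Dom_find_stem_ind target stem_L → Spec_find_stem_ind target stem_L (find_stem_ind target stem_L)

-- ===== LEMMAS AND PROOFS =====

-- length of a complementary run starting at stem end e and rc position p (Nat spec of the DP)
def runSpec (t : List Char) : Nat → Nat → Nat
  | 0, p => if p < t.length ∧ t.getD p ' ' = pvComp (t.getD 0 ' ') then 1 else 0
  | e+1, p => if p < t.length ∧ t.getD p ' ' = pvComp (t.getD (e+1) ' ') then 1 + runSpec t e (p+1) else 0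

def rowSpec (t : List Char) (e : Nat) : List Int :=
  (List.range t.length).map (fun p => (runSpec t e p : Int)) ++ [0]

lemma runSpec_len (t : List Char) (e p : Nat) (h : t.length ≤ p) : runSpec t e p = 0 := by
  cases e <;> simp [runSpec, Nat.not_lt.mpr h]

lemma rowSpec_getD (t : List Char) (e p : Nat) (hp : p ≤ t.length) :
    (rowSpec t e).getD p 0 = (runSpec t e p : Int) := by
  unfold rowSpec
  rcases lt_or_eq_of_le hp with h | h
  · rw [List.getD_eq_getElem?_getD, List.getElem?_append_left (by simpa using h)]
    simp [h]
  · subst h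
    rw [List.getD_eq_getElem?_getD, List.getElem?_append_right (by simp)]
    simp [runSpec_len t e t.length le_rfl]

-- the 'prev' row after e iterations of B's table loop
def prevAt (t : List Char) : Nat → List Int
  | 0 => List.replicate (t.length + 1) (0 : Int)
  | m+1 => rowSpec t m

lemma prevAt_getD (t : List Char) (m p : Nat) (hp : p ≤ t.length) :
    (prevAt t m).getD p 0 = (match m with | 0 => (0:Int) | m'+1 => (runSpec t m' p : Int)) := by
  cases m with
  | zero =>
    simp only [prevAt]
    have h : p < t.length + 1 := by omega
    · rw [List.getD_eq_getElem?_getD, List.getElem?_replicate]; simp [h]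
  | succ m' => simpa using rowSpec_getD t m' p hp

lemma pvRow_eq (t : List Char) (m : Nat) (hm : m < t.length) :
    pvRow t (prevAt t m) (m : Int) = rowSpec t m := by
  unfold pvRow rowSpec
  rw [PySem.List.pyRange_one]
  simp only [Int.sub_zero, Int.toNat_natCast, List.map_map]
  congr 1
  apply List.map_congr_left
  intro p hp
  have hpn : p < t.length := List.mem_range.mp hp
  simp only [Function.comp, zero_add, PySem.List.pyGetD_natCast]
  rw [show ((p:Int) + 1) = ((p+1 : Nat) : Int) from by push_cast; ring]
  rw [PySem.List.pyGetD_natCast, prevAt_getD t m (p+1) (by omega)]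
  cases m with
  | zero =>
    simp only [runSpec, hpn, true_and]
    by_cases h : t.getD p ' ' = pvComp (t.getD 0 ' ') <;> simp [beq_iff_eq]
  | succ m' =>
    simp only [runSpec, hpn, true_and]
    by_cases h : t.getD p ' ' = pvComp (t.getD (m'+1) ' ') <;> simp [beq_iff_eq]

lemma pvRun_inv (t : List Char) : ∀ m, m ≤ t.length →
    ((List.range m).map (fun k : Nat => ((0:Int) + k))).foldl
      (fun st e => let cur := pvRow t st.2 e; (st.1 ++ [cur], cur))
      (([] : List (List Int)), List.replicate (t.length + 1) (0 : Int))
    = ((List.range m).map (rowSpec t), prevAt t m) := by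
  intro m
  induction m with
  | zero => intro _; simp [prevAt]
  | succ m ih =>
    intro hm
    rw [List.range_succ, List.map_append, List.foldl_append, ih (by omega)]
    simp only [List.map_cons, List.map_nil, List.foldl_cons, List.foldl_nil]
    rw [show ((0:Int) + (m:Int)) = (m:Int) by ring, pvRow_eq t m (by omega)]
    simp [prevAt]

lemma pvRun_eq (t : List Char) : pvRun t = (List.range t.length).map (rowSpec t) := by
  unfold pvRun
  rw [PySem.List.pyRange_one]
  simp only [Int.sub_zero, Int.toNat_natCast]
  rw [pvRun_inv t t.length le_rfl]

lemma pvRun_getD (t : List Char) (e p : Nat) (he : e < t.length) (hp : p ≤ t.length) :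
    PySem.List.pyGetD (PySem.List.pyGetD (pvRun t) (e : Int) []) (p : Int) 0
      = (runSpec t e p : Int) := by
  rw [PySem.List.pyGetD_natCast, PySem.List.pyGetD_natCast, pvRun_eq]
  rw [show (List.map (rowSpec t) (List.range t.length)).getD e [] = rowSpec t e from by
    rw [List.getD_eq_getElem?_getD, List.getElem?_map, List.getElem?_range he]; rfl]
  exact rowSpec_getD t e p hp

-- runSpec ≥ i ↔ i consecutive complementary character pairs
lemma runSpec_ge_iff (t : List Char) (i e p : Nat) (hie : i ≤ e + 1) :
    i ≤ runSpec t e p ↔ ∀ k < i, p + k < t.length ∧ t.getD (p+k) ' ' = pvComp (t.getD (e-k) ' ') := by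
  induction i generalizing e p with
  | zero => simp
  | succ i ih =>
    cases e with
    | zero =>
      have hi0 : i = 0 := by omega
      subst hi0
      simp only [runSpec]
      split_ifs with hC
      · constructor
        · intro _ k hk
          have hk0 : k = 0 := by omega
          subst hk0
          simpa using hC
        · intro _; omega
      · constructor
        · intro h; omega
        · intro h
          exact absurd (by simpa using h 0 (by omega)) hC
    | succ e' =>
      have hie' : i ≤ e' + 1 := by omega
      simp only [runSpec]
      split_ifs with hC
      · rw [show i + 1 ≤ 1 + runSpec t e' (p+1) ↔ i ≤ runSpec t e' (p+1) from by omega]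
        rw [ih e' (p+1) hie']
        constructor
        · intro h k hk
          cases k with
          | zero => simpa using hC
          | succ k' =>
            have := h k' (by omega)
            rw [show p + (k'+1) = p + 1 + k' from by omega,
                show e' + 1 - (k'+1) = e' - k' from by omega]
            exact this
        · intro h k hk
          have := h (k+1) (by omega)
          rw [show p + (k+1) = p + 1 + k from by omega] at this
          rw [show e' + 1 - (k+1) = e' - k from by omega] at this
          exact this
      · constructor
        · intro h; omega
        · intro h
          exact absurd (by simpa using h 0 (by omega)) hC

-- the pattern A searches for, as a prefix condition
lemma pat_prefix_iff (t : List Char) (iN jN pN : Nat) (hj : jN + 2*iN ≤ t.length)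
    (hpn : pN ≤ t.length) :
    pvRc (((t.drop jN).take iN)) <+: t.drop pN ↔
      (pN + iN ≤ t.length ∧ ∀ k < iN, t.getD (pN+k) ' ' = pvComp (t.getD (jN+iN-1-k) ' ')) := by
  have hlenpat : (pvRc ((t.drop jN).take iN)).length = iN := by
    simp [pvRc, List.length_take, List.length_drop]
    omega
  by_cases hfit : pN + iN ≤ t.length
  · rw [List.prefix_iff_eq_take]
    have hlen2 : ((t.drop pN).take (pvRc ((t.drop jN).take iN)).length).length = iN := by
      simp [hlenpat, List.length_take, List.length_drop]
      omega
    constructor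
    · intro h
      refine ⟨hfit, fun k hk => ?_⟩
      have hb2 : pN + k < t.length := by omega
      have hb1 : jN + (iN - 1 - k) < t.length := by omega
      have hk1 : k < (pvRc ((t.drop jN).take iN)).length := by omega
      have hk2 : k < ((t.drop pN).take (pvRc ((t.drop jN).take iN)).length).length := by omega
      have hgk : (pvRc ((t.drop jN).take iN))[k]'hk1
          = ((t.drop pN).take (pvRc ((t.drop jN).take iN)).length)[k]'hk2 := by
        exact List.getElem_of_eq h hk1
      have h1 : (pvRc ((t.drop jN).take iN))[k]'hk1
          = pvComp (t[jN + (iN - 1 - k)]'hb1) := by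
        simp [pvRc, List.getElem_take, List.getElem_drop, List.length_take, List.length_drop,
              Nat.min_eq_left (by omega : iN ≤ t.length - jN)]
      have h2 : ((t.drop pN).take (pvRc ((t.drop jN).take iN)).length)[k]'hk2
          = t[pN + k]'hb2 := by
        simp [List.getElem_take, List.getElem_drop]
      rw [h1, h2] at hgk
      rw [List.getD_eq_getElem t ' ' (by omega : pN + k < t.length),
          List.getD_eq_getElem t ' ' (by omega : jN + iN - 1 - k < t.length)]
      rw [← hgk]
      congr 2
      omega
    · rintro ⟨-, h⟩
      apply List.ext_getElem (hlenpat.trans hlen2.symm)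
      intro k hk1 hk2
      have hkiN : k < iN := by rw [hlenpat] at hk1; exact hk1
      have hb2 : pN + k < t.length := by omega
      have hb1 : jN + (iN - 1 - k) < t.length := by omega
      have h1 : (pvRc ((t.drop jN).take iN))[k]'hk1
          = pvComp (t[jN + (iN - 1 - k)]'hb1) := by
        simp [pvRc, List.getElem_take, List.getElem_drop, List.length_take, List.length_drop,
              Nat.min_eq_left (by omega : iN ≤ t.length - jN)]
      have h2 : ((t.drop pN).take (pvRc ((t.drop jN).take iN)).length)[k]'hk2
          = t[pN + k]'hb2 := by
        simp [List.getElem_take, List.getElem_drop]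
      rw [h1, h2]
      have := h k hkiN
      rw [List.getD_eq_getElem t ' ' (by omega : pN + k < t.length),
          List.getD_eq_getElem t ' ' (by omega : jN + iN - 1 - k < t.length)] at this
      rw [this]
      congr 2
      omega
  · constructor
    · intro h
      have := h.length_le
      rw [hlenpat, List.length_drop] at this
      omega
    · rintro ⟨h, -⟩
      omega

-- B's scan helpers
lemma pvBP_none (run : List (List Int)) (i j e : Int) (ps : List Int)
    (h : ∀ p ∈ ps, ¬ ((if 0 ≤ e then PySem.List.pyGetD (PySem.List.pyGetD run e []) p 0 else 0) ≥ i)) :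
    pvBP run i j e ps = none := by
  induction ps with
  | nil => rfl
  | cons p ps ih =>
    simp only [pvBP]
    rw [if_neg (h p (by simp))]
    exact ih (fun q hq => h q (by simp [hq]))

lemma pvBP_first (run : List (List Int)) (i j e : Int) (p0 : Int) :
    ∀ (a b : Int), a ≤ p0 → p0 < b →
    ((if 0 ≤ e then PySem.List.pyGetD (PySem.List.pyGetD run e []) p0 0 else 0) ≥ i) →
    (∀ p, a ≤ p → p < p0 → ¬ ((if 0 ≤ e then PySem.List.pyGetD (PySem.List.pyGetD run e []) p 0 else 0) ≥ i)) →
    pvBP run i j e (PySem.List.pyRange a b) = some [j, e, p0, p0 + i - 1, i] := by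
  intro a b
  induction hm : (p0 - a).toNat generalizing a with
  | zero =>
    intro ha hb hfire _
    have ha0 : a = p0 := by omega
    subst ha0
    rw [PySem.List.pyRange_one_cons (by omega)]
    simp only [pvBP]
    rw [if_pos hfire]
  | succ m ih =>
    intro ha hb hfire hmin
    have halt : a < p0 := by omega
    rw [PySem.List.pyRange_one_cons (by omega)]
    simp only [pvBP]
    rw [if_neg (hmin a le_rfl halt)]
    exact ih (a+1) (by omega) (by omega) (by omega) hfire (fun p hp1 hp2 => hmin p (by omega) hp2)

-- B's O(1) test against the table equals "A's pattern occurs at p"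
lemma fire_iff (t : List Char) (iN jN pN : Nat) (hj : jN + 2*iN ≤ t.length) (hpn : pN ≤ t.length) :
    ((if (0:Int) ≤ (jN:Int) + (iN:Int) - 1 then
        PySem.List.pyGetD (PySem.List.pyGetD (pvRun t) ((jN:Int) + (iN:Int) - 1) []) (pN:Int) 0
      else 0) ≥ (iN:Int))
    ↔ pvRc ((t.drop jN).take iN) <+: t.drop pN := by
  rcases Nat.eq_zero_or_pos iN with hi0 | hipos
  · subst hi0
    have hpre : pvRc ((t.drop jN).take (0:Nat)) <+: t.drop pN := by
      simp [pvRc]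
    refine ⟨fun _ => hpre, fun _ => ?_⟩
    split_ifs with h0
    · rw [show (jN:Int) + (0:Nat) - 1 = ((jN - 1 : Nat) : Int) from by omega]
      rw [pvRun_getD t (jN-1) pN (by omega) hpn]
      positivity
    · simp
  · have he : (jN:Int) + (iN:Int) - 1 = ((jN + iN - 1 : Nat) : Int) := by omega
    rw [if_pos (by omega : (0:Int) ≤ (jN:Int) + (iN:Int) - 1), he,
        pvRun_getD t (jN + iN - 1) pN (by omega) hpn]
    rw [show ((runSpec t (jN + iN - 1) pN : Int) ≥ (iN : Int)) ↔ iN ≤ runSpec t (jN + iN - 1) pN from by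
      constructor <;> intro h <;> exact_mod_cast h]
    rw [runSpec_ge_iff t iN (jN + iN - 1) pN (by omega)]
    rw [pat_prefix_iff t iN jN pN hj hpn]
    constructor
    · intro h
      refine ⟨?_, fun k hk => ?_⟩
      · have := (h (iN - 1) (by omega)).1
        omega
      · have := (h k hk).2
        rwa [show jN + iN - 1 - k = jN + iN - 1 - k from rfl] at this
    · rintro ⟨h1, h2⟩ k hk
      exact ⟨by omega, h2 k hk⟩

-- the per-(i,j) core: A's find-based test equals B's table scan
lemma head_eq (t : List Char) (iN jN : Nat) (hj : jN + 2*iN ≤ t.length) (loc : Int)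
    (hloc : loc = PySem.Chars.find (PySem.List.slice t (some ((jN:Int)+(iN:Int))) none)
                    (pvRc (PySem.List.slice t (some (jN:Int)) (some ((jN:Int)+(iN:Int)))))) :
    (if loc > -1 then
       some [(jN:Int), (iN:Int) + jN - 1, loc + iN + jN, loc + iN + jN + iN - 1, ((iN:Int) + jN - 1) - jN + 1]
     else none)
    = pvBP (pvRun t) iN jN ((jN:Int) + iN - 1) (PySem.List.pyRange ((jN:Int)+(iN:Int)) ((t.length : Int) + 1)) := by
  have hcast : (jN:Int) + (iN:Int) = ((jN + iN : Nat) : Int) := by push_cast; ring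
  have hs1 : PySem.List.slice t (some ((jN:Int)+(iN:Int))) none = t.drop (jN+iN) := by
    rw [hcast, PySem.List.slice_from t (by positivity)]
    simp
    omega
  have hs2 : PySem.List.slice t (some (jN:Int)) (some ((jN:Int)+(iN:Int))) = (t.drop jN).take iN := by
    rw [hcast, PySem.List.slice_toNat t (by positivity) (by positivity)]
    simp
    omega
  rw [hs1, hs2] at hloc
  by_cases hocc : pvRc ((t.drop jN).take iN) <:+: t.drop (jN+iN)
  · have hl0 : 0 ≤ loc := hloc ▸ (PySem.Chars.find_nonneg_iff _ _).mpr hocc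
    have hspec := PySem.Chars.find_spec (hloc ▸ hl0)
    rw [← hloc] at hspec
    obtain ⟨hpre, hmin⟩ := hspec
    have hlen : loc ≤ ((t.drop (jN+iN)).length : Int) := hloc ▸ PySem.Chars.find_le_length _ _
    have hl : loc = ((loc.toNat : Nat) : Int) := (Int.toNat_of_nonneg hl0).symm
    have hlnn : jN + iN + loc.toNat ≤ t.length := by
      rw [List.length_drop] at hlen
      omega
    rw [if_pos (by omega : loc > -1)]
    have hdd : t.drop (jN + iN + loc.toNat) = (t.drop (jN+iN)).drop loc.toNat := by
      rw [List.drop_drop, Nat.add_comm]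
    have hfire : ((if (0:Int) ≤ (jN:Int) + iN - 1 then
        PySem.List.pyGetD (PySem.List.pyGetD (pvRun t) ((jN:Int) + iN - 1) [])
          (((jN + iN + loc.toNat : Nat) : Int)) 0 else 0) ≥ (iN:Int)) := by
      rw [fire_iff t iN jN (jN + iN + loc.toNat) hj hlnn, hdd]
      exact hpre
    have hmin' : ∀ p : Int, (jN:Int) + iN ≤ p → p < ((jN + iN + loc.toNat : Nat) : Int) →
        ¬ ((if (0:Int) ≤ (jN:Int) + iN - 1 then
            PySem.List.pyGetD (PySem.List.pyGetD (pvRun t) ((jN:Int) + iN - 1) []) p 0 else 0) ≥ (iN:Int)) := by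
      intro p hp1 hp2
      have hp0 : (0:Int) ≤ p := by omega
      have hpc : p = ((p.toNat : Nat) : Int) := (Int.toNat_of_nonneg hp0).symm
      rw [hpc, fire_iff t iN jN p.toNat hj (by omega)]
      intro hfire
      rw [show t.drop p.toNat = (t.drop (jN+iN)).drop (p.toNat - (jN+iN)) from by
        rw [List.drop_drop]; congr 1; omega] at hfire
      exact hmin (p.toNat - (jN+iN)) (by omega) hfire
    rw [pvBP_first (pvRun t) (iN:Int) (jN:Int) ((jN:Int) + iN - 1)
          (((jN + iN + loc.toNat : Nat) : Int)) ((jN:Int)+(iN:Int)) ((t.length : Int) + 1)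
          (by push_cast; omega) (by push_cast; omega) hfire hmin']
    simp only [Option.some.injEq, List.cons.injEq, and_true, true_and]
    push_cast
    omega
  · have hl1 : loc = -1 := hloc ▸ (PySem.Chars.find_eq_neg_one_iff _ _).mpr hocc
    rw [hl1, if_neg (by omega : ¬ ((-1:Int) > -1))]
    symm
    apply pvBP_none
    intro p hp
    rw [PySem.List.mem_pyRange_one] at hp
    obtain ⟨hp1, hp2⟩ := hp
    have hp0 : (0:Int) ≤ p := by omega
    have hpc : p = ((p.toNat : Nat) : Int) := (Int.toNat_of_nonneg hp0).symm
    rw [hpc, fire_iff t iN jN p.toNat hj (by omega)]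
    intro hfire
    apply hocc
    rw [show t.drop p.toNat = (t.drop (jN+iN)).drop (p.toNat - (jN+iN)) from by
      rw [List.drop_drop]; congr 1; omega] at hfire
    exact hfire.isInfix.trans (List.drop_suffix _ _).isInfix

lemma pvRowmax_isMax (t : List Char) (eN : Nat) (he : eN < t.length) (y : Int)
    (hy : y ∈ rowSpec t eN) :
    y ≤ PySem.List.pyGetD (pvRowmax (pvRun t)) (eN:Int) 0 := by
  have hrow : PySem.List.pyGetD (pvRowmax (pvRun t)) (eN:Int) 0
      = (PySem.List.max? (rowSpec t eN) (fun y => y)).getD 0 := by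
    rw [PySem.List.pyGetD_natCast, pvRun_eq]
    unfold pvRowmax
    rw [List.getD_eq_getElem?_getD, List.getElem?_map, List.getElem?_map, List.getElem?_range he]
    rfl
  rw [hrow]
  cases hmax : PySem.List.max? (rowSpec t eN) (fun y => y) with
  | none =>
    have : rowSpec t eN = [] := (PySem.List.max?_eq_none_iff _ _).mp hmax
    simp [rowSpec] at this
  | some m =>
    simpa using PySem.List.max?_isMax hmax y hy

lemma runSpec_mem_rowSpec (t : List Char) (eN pN : Nat) (hp : pN ≤ t.length) :
    ((runSpec t eN pN : Int)) ∈ rowSpec t eN := by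
  unfold rowSpec
  rcases Nat.lt_or_ge pN t.length with h | h
  · exact List.mem_append_left _ (List.mem_map.mpr ⟨pN, List.mem_range.mpr h, rfl⟩)
  · have hpn : pN = t.length := by omega
    rw [hpn, runSpec_len t eN t.length le_rfl]
    simp

lemma guard_no_fire (t : List Char) (iN jN : Nat)
    (hg : 0 ≤ (jN:Int) + (iN:Int) - 1 ∧
          PySem.List.pyGetD (pvRowmax (pvRun t)) ((jN:Int) + (iN:Int) - 1) 0 < (iN:Int)) :
    pvBP (pvRun t) (iN:Int) (jN:Int) ((jN:Int) + (iN:Int) - 1)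
      (PySem.List.pyRange ((jN:Int)+(iN:Int)) ((t.length:Int) + 1)) = none := by
  obtain ⟨hg1, hg2⟩ := hg
  apply pvBP_none
  intro p hp
  rw [PySem.List.mem_pyRange_one] at hp
  obtain ⟨hp1, hp2⟩ := hp
  have he : (jN:Int) + (iN:Int) - 1 = ((jN + iN - 1 : Nat) : Int) := by omega
  have heN : jN + iN - 1 < t.length := by omega
  intro hfire
  rw [if_pos hg1] at hfire
  have hpN : p = ((p.toNat : Nat) : Int) := (Int.toNat_of_nonneg (by omega)).symm
  rw [he, hpN, pvRun_getD t (jN+iN-1) p.toNat heN (by omega)] at hfire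
  have hle := pvRowmax_isMax t (jN+iN-1) heN _ (runSpec_mem_rowSpec t (jN+iN-1) p.toNat (by omega))
  rw [he] at hg2
  omega

lemma AJ_eq_BJ (t : List Char) (iN : Nat) :
    ∀ js : List Int, (∀ j ∈ js, 0 ≤ j ∧ j + 2*iN ≤ t.length) →
    pvAJ t iN js = pvBJ t (pvRun t) (pvRowmax (pvRun t)) iN js := by
  intro js
  induction js with
  | nil => intro _; rfl
  | cons j js ih =>
    intro hmem
    obtain ⟨hj0, hjb⟩ := hmem j (by simp)
    have hjc : j = ((j.toNat : Nat) : Int) := (Int.toNat_of_nonneg hj0).symm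
    simp only [pvAJ, pvBJ]
    rw [hjc]
    have hh := head_eq t iN j.toNat (by omega) _ rfl
    by_cases hg : 0 ≤ ((j.toNat:Nat):Int) + (iN:Int) - 1 ∧
        PySem.List.pyGetD (pvRowmax (pvRun t)) (((j.toNat:Nat):Int) + (iN:Int) - 1) 0 < (iN:Int)
    · rw [if_pos hg]
      have hnone := guard_no_fire t iN j.toNat hg
      rw [hnone] at hh
      by_cases hcond : PySem.Chars.find (PySem.List.slice t (some (((j.toNat:Nat):Int) + iN)) none)
          (pvRc (PySem.List.slice t (some ((j.toNat:Nat):Int)) (some (((j.toNat:Nat):Int) + iN)))) > -1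
      · rw [if_pos hcond] at hh
        exact absurd hh (by simp)
      · rw [if_neg hcond]
        exact ih (fun q hq => hmem q (by simp [hq]))
    · rw [if_neg hg]
      cases hbp : pvBP (pvRun t) (iN:Int) ((j.toNat:Nat):Int) (((j.toNat:Nat):Int) + iN - 1)
        (PySem.List.pyRange (((j.toNat:Nat):Int) + iN) ((t.length : Int) + 1)) with
    | some r =>
      rw [hbp] at hh
      by_cases hcond : PySem.Chars.find (PySem.List.slice t (some (((j.toNat:Nat):Int) + iN)) none)
          (pvRc (PySem.List.slice t (some ((j.toNat:Nat):Int)) (some (((j.toNat:Nat):Int) + iN)))) > -1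
      · rw [if_pos hcond] at hh ⊢
        exact hh
      · rw [if_neg hcond] at hh
        exact absurd hh (by simp)
    | none =>
      rw [hbp] at hh
      by_cases hcond : PySem.Chars.find (PySem.List.slice t (some (((j.toNat:Nat):Int) + iN)) none)
          (pvRc (PySem.List.slice t (some ((j.toNat:Nat):Int)) (some (((j.toNat:Nat):Int) + iN)))) > -1
      · rw [if_pos hcond] at hh
        exact absurd hh (by simp)
      · rw [if_neg hcond]
        exact ih (fun q hq => hmem q (by simp [hq]))

-- at i = 0 both sides fire immediately (empty stem)
lemma AJ_zero_fires (t : List Char) :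
    ∃ r, pvAJ t 0 (PySem.List.pyRange 0 ((t.length : Int) - 2*0 + 1)) = some r := by
  refine ⟨[0, 0 + 0 - 1, 0 + 0 + 0, 0 + 0 + 0 + 0 - 1, (0 + 0 - 1) - 0 + 1], ?_⟩
  rw [PySem.List.pyRange_one_cons (by omega : (0:Int) < (t.length : Int) - 2*0 + 1)]
  simp only [pvAJ]
  have h2 : PySem.List.slice t (some (0:Int)) (some ((0:Int) + 0)) = [] := by
    rw [show ((0:Int) + 0) = (((0:Nat)):Int) from by norm_num,
        show ((0:Int)) = (((0:Nat)):Int) from by norm_num,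
        PySem.List.slice_toNat t (by norm_num) (by norm_num)]
    simp
  rw [h2]
  simp [pvRc, PySem.Chars.find_nil]

lemma AI_eq_BI (t : List Char) :
    ∀ (L rest : List Int), (∀ i ∈ L, 0 ≤ i ∧ i ≤ PySem.Int.floordiv (t.length : Int) 2) →
    ((0 : Int) ∈ L ∨ rest = []) →
    pvAI t (L ++ rest) = pvBI t (pvRun t) (pvRowmax (pvRun t)) L := by
  intro L rest
  induction L with
  | nil =>
    intro _ h0
    rcases h0 with h | h
    · simp at h
    · subst h; rfl
  | cons i L ih =>
    intro hmem h0
    obtain ⟨hi0, hims⟩ := hmem i (by simp)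
    have h2i : 2*i ≤ (t.length : Int) := by
      have := (PySem.Int.le_floordiv_iff_mul_le (by norm_num : (0:Int) < 2)).mp hims
      omega
    have hic : i = ((i.toNat : Nat) : Int) := (Int.toNat_of_nonneg hi0).symm
    have hAB : pvAJ t i (PySem.List.pyRange 0 ((t.length:Int) - 2*i + 1))
        = pvBJ t (pvRun t) (pvRowmax (pvRun t)) i (PySem.List.pyRange 0 ((t.length:Int) - 2*i + 1)) := by
      rw [hic]
      apply AJ_eq_BJ t i.toNat
      intro q hq
      rw [PySem.List.mem_pyRange_one] at hq
      refine ⟨hq.1, ?_⟩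
      omega
    simp only [pvAI, pvBI, List.cons_append]
    rw [hAB]
    cases hbj : pvBJ t (pvRun t) (pvRowmax (pvRun t)) i (PySem.List.pyRange 0 ((t.length:Int) - 2*i + 1)) with
    | some r => rfl
    | none =>
      apply ih (fun q hq => hmem q (by simp [hq]))
      rcases h0 with h | h
      · rcases List.mem_cons.mp h with h' | h'
        · exfalso
          subst h'
          obtain ⟨r, hr⟩ := AJ_zero_fires t
          rw [hAB, hbj] at hr
          simp at hr
        · exact Or.inl h'
      · exact Or.inr h

-- ===== VERDICT (by name: the statement is the Claim_ definition above) =====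
theorem find_stem_ind_spec : Claim_equal_find_stem_ind := by
  intro target stem_L _
  unfold Spec_find_stem_ind find_stem_ind find_stem_ind_alt
  dsimp only
  have hms0 : (0:Int) ≤ PySem.Int.floordiv (target.toList.length : Int) 2 := by
    have h : PySem.Int.floordiv (target.toList.length : Int) 2 = ((target.toList.length / 2 : Nat) : Int) := by
      exact_mod_cast PySem.Int.floordiv_natCast target.toList.length 2
    omega
  by_cases hs : 0 ≤ stem_L
  · rw [max_eq_left hs]
    have h := AI_eq_BI target.toList
        ((PySem.List.pyRange stem_L (PySem.Int.floordiv (target.toList.length : Int) 2 + 1)).reverse) []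
        (by intro i hi
            rw [List.mem_reverse, PySem.List.mem_pyRange_one] at hi
            exact ⟨le_trans hs hi.1, by omega⟩)
        (Or.inr rfl)
    rw [List.append_nil] at h
    exact h
  · have hs' : stem_L < 0 := by omega
    rw [max_eq_right (le_of_lt hs')]
    rw [PySem.List.pyRange_one_append stem_L 0 (PySem.Int.floordiv (target.toList.length : Int) 2 + 1)
          (le_of_lt hs') (by omega), List.reverse_append]
    apply AI_eq_BI
    · intro i hi
      rw [List.mem_reverse, PySem.List.mem_pyRange_one] at hi
      exact ⟨hi.1, by omega⟩
    · refine Or.inl ?_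
      rw [List.mem_reverse, PySem.List.mem_pyRange_one]
      omega
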